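-- pv_equiv track=rewrite | github.com/Futty93/Callsign-Extraction | sentenceFormat.py | word_combination_formatter
-- ===== SOURCE A (Python) =====
-- def word_combination_formatter(sentence: str) -> list[str, str]:
--     """
--     整形済みの文章を受け取り、奇数番目と偶数番目に分けて連続する単語を接続して返す
--
--     Parameter
--     ---
--         sentence: str
--             整形済みの文章
--
--     Returne
--     ---
--         even_word_sentence: str
--             偶数番目の単語とその次の単語を接続した文章を返す。ただし偶数番目が数字の場合は数字だけを追加し、偶数番目の次の単語が数字の場合は接合せずに2つの単語を並べて返す
--
--         odd_word_sentence: str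
--             奇数番目の単語とその次の単語を接続した文章を返す。ただし奇数番目が数字の場合は数字だけを追加し、奇数番目の次の単語が数字の場合は接合せずに2つの単語を並べて返す
--     """
--     word_list = sentence.split()
--     even_word_sentence = []
--     odd_word_sentence = []
--
--     for i in range(len(word_list)-1):
--         current_word = word_list[i]
--         next_word = word_list[i+1]
--
--         if i % 2 == 0:
--             if next_word.isdigit():
--                 even_word_sentence.extend([current_word, next_word])
--             elif current_word.isdigit():
--                 even_word_sentence.append(current_word)
--             else:
--                 even_word_sentence.append(current_word + next_word)
--         else:
--             if next_word.isdigit():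
--                 odd_word_sentence.extend([current_word, next_word])
--             elif current_word.isdigit():
--                 odd_word_sentence.append(current_word)
--             else:
--                 odd_word_sentence.append(current_word + next_word)
--
--     even_word_sentence = ' '.join(even_word_sentence)
--     odd_word_sentence = ' '.join(odd_word_sentence)
--
--     return [even_word_sentence, odd_word_sentence]
-- ===== SOURCE B (Python) =====
-- def _combine(cur, nxt):
--     if nxt.isdigit():
--         return [cur, nxt]
--     if cur.isdigit():
--         return [cur]
--     return [cur + nxt]
--
--
-- def word_combination_formatter(sentence: str) -> list[str, str]:
--     words = sentence.split()
--     even_word_sentence = []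
--     for i in range(0, len(words) - 1, 2):
--         even_word_sentence += _combine(words[i], words[i + 1])
--     odd_word_sentence = []
--     for i in range(1, len(words) - 1, 2):
--         odd_word_sentence += _combine(words[i], words[i + 1])
--     return [' '.join(even_word_sentence), ' '.join(odd_word_sentence)]
-- ===== Notes on version B (the rewrite author's own statement) =====
-- stated objective: simpler
-- what changed: A's single interleaved loop with an i%2 parity branch duplicating the three-way combine logic is replaced by a combine(cur,nxt) helper and two disjoint strided loops (range(0,n-1,2) and range(1,n-1,2)) that build the even and odd sentences separately.
import Mathlib
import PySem

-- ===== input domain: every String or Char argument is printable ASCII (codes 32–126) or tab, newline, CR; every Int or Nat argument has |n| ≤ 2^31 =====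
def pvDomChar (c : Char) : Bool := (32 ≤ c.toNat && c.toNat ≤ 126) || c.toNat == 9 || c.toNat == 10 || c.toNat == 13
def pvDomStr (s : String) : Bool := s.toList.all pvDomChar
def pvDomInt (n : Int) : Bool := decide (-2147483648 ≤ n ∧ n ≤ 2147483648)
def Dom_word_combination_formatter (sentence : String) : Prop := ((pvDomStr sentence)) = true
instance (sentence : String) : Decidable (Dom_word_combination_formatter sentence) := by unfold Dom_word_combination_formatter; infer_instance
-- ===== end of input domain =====

-- B replaces A's single interleaved parity-branched pass with a combine helper and two disjoint
-- strided loops (objective: simpler decomposition; no speed claim).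

-- ===== PORT A =====
def word_combination_formatter (sentence : String) : List String :=
  let word_list := PySem.Str.split₀ sentence
  let p := (PySem.List.pyRange 0 (PySem.List.len word_list - 1) 1).foldl
    (fun (acc : List String × List String) i =>
      let current_word := PySem.List.pyGetD word_list i ""
      let next_word := PySem.List.pyGetD word_list (i + 1) ""
      if PySem.Int.mod i 2 = 0 then
        if PySem.Str.strIsdigit next_word then (acc.1 ++ [current_word, next_word], acc.2)
        else if PySem.Str.strIsdigit current_word then (acc.1 ++ [current_word], acc.2)
        else (acc.1 ++ [current_word ++ next_word], acc.2)
      else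
        if PySem.Str.strIsdigit next_word then (acc.1, acc.2 ++ [current_word, next_word])
        else if PySem.Str.strIsdigit current_word then (acc.1, acc.2 ++ [current_word])
        else (acc.1, acc.2 ++ [current_word ++ next_word]))
    ([], [])
  [PySem.Str.join " " p.1, PySem.Str.join " " p.2]

-- ===== PORT B =====
def pvCombine (cur nxt : String) : List String :=
  if PySem.Str.strIsdigit nxt then [cur, nxt]
  else if PySem.Str.strIsdigit cur then [cur]
  else [cur ++ nxt]

def word_combination_formatter_alt (sentence : String) : List String :=
  let words := PySem.Str.split₀ sentence
  let even_word_sentence := (PySem.List.pyRange 0 (PySem.List.len words - 1) 2).foldl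
    (fun acc i => acc ++ pvCombine (PySem.List.pyGetD words i "") (PySem.List.pyGetD words (i + 1) "")) []
  let odd_word_sentence := (PySem.List.pyRange 1 (PySem.List.len words - 1) 2).foldl
    (fun acc i => acc ++ pvCombine (PySem.List.pyGetD words i "") (PySem.List.pyGetD words (i + 1) "")) []
  [PySem.Str.join " " even_word_sentence, PySem.Str.join " " odd_word_sentence]

-- ===== PRECONDITION & SPEC =====
def Spec_word_combination_formatter (sentence : String) (out : List String) : Prop := out = word_combination_formatter_alt sentence
instance (sentence : String) (out : List String) : Decidable (Spec_word_combination_formatter sentence out) := by unfold Spec_word_combination_formatter; infer_instance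

-- ===== CLAIM (what is proved, stated in full; the proofs are below) =====
def Claim_equal_word_combination_formatter : Prop := ∀ (sentence : String), Dom_word_combination_formatter sentence → Spec_word_combination_formatter sentence (word_combination_formatter sentence)

-- ===== LEMMAS AND PROOFS =====

-- The common value of both loops: the tokens contributed by the pairs (0,1), (2,3), … of a word list.
def pvE : List String → List String
  | a :: b :: rest => pvCombine a b ++ pvE (rest)
  | _ => []

theorem pvE_short (l : List String) (h : l.length ≤ 1) : pvE l = [] := by
  match l with
  | [] => rfl
  | [a] => rfl
  | a :: b :: r => simp at h

theorem pyRange_two_eq_nil (a b : Int) (h : b ≤ a) : PySem.List.pyRange a b 2 = [] := by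
  rw [PySem.List.pyRange_of_pos a b (by norm_num)]
  simp [show ¬ a < b by omega]

theorem pyRange_two_cons (a b : Int) (h : a < b) : PySem.List.pyRange a b 2 = a :: PySem.List.pyRange (a + 2) b 2 := by
  rw [PySem.List.pyRange_of_pos a b (by norm_num), PySem.List.pyRange_of_pos (a + 2) b (by norm_num)]
  by_cases h2 : a + 2 < b
  · have hn : ((b - a + 2 - 1) / 2).toNat = ((b - (a + 2) + 2 - 1) / 2).toNat + 1 := by omega
    simp only [if_pos h, if_pos h2, hn, List.range_succ_eq_map, List.map_cons, List.map_map]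
    congr 1
    · norm_num
    · apply List.map_congr_left
      intro k _
      simp only [Function.comp]
      push_cast
      ring
  · have hn : ((b - a + 2 - 1) / 2).toNat = 1 := by omega
    simp [if_pos h, if_neg h2, hn]

-- B's strided loop from index a collects exactly the pair tokens of the suffix from a.
theorem pvBloop (w : List String) (k : Nat) : ∀ (a : Nat) (acc : List String), w.length ≤ a + k →
    (PySem.List.pyRange (a : Int) (PySem.List.len w - 1) 2).foldl
      (fun acc i => acc ++ pvCombine (PySem.List.pyGetD w i "") (PySem.List.pyGetD w (i + 1) "")) acc
    = acc ++ pvE (w.drop a) := by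
  induction k with
  | zero =>
    intro a acc ha
    rw [pyRange_two_eq_nil _ _ (by simp [PySem.List.len_eq]; omega)]
    rw [pvE_short _ (by simp; omega)]
    simp
  | succ k ih =>
    intro a acc ha
    by_cases hlt : a + 1 < w.length
    · rw [pyRange_two_cons _ _ (by simp [PySem.List.len_eq]; omega)]
      simp only [List.foldl_cons]
      have h2 : ((a : Int) + 2) = ((a + 2 : Nat) : Int) := by push_cast; ring
      rw [h2, ih (a + 2) _ (by omega)]
      have hd : w.drop a = w[a] :: w[a + 1] :: w.drop (a + 2) := by
        rw [List.drop_eq_getElem_cons (by omega), List.drop_eq_getElem_cons (by omega)]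
      have hg1 : PySem.List.pyGetD w (a : Int) "" = w[a] := by
        rw [PySem.List.pyGetD_natCast, List.getD_eq_getElem?_getD,
          List.getElem?_eq_getElem (by omega : a < w.length)]
        rfl
      have hg2 : PySem.List.pyGetD w ((a : Int) + 1) "" = w[a + 1] := by
        rw [show ((a : Int) + 1) = ((a + 1 : Nat) : Int) by push_cast; ring,
          PySem.List.pyGetD_natCast, List.getD_eq_getElem?_getD, List.getElem?_eq_getElem hlt]
        rfl
      rw [hg1, hg2, hd]
      simp [pvE]
    · rw [pyRange_two_eq_nil _ _ (by simp [PySem.List.len_eq]; omega)]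
      rw [pvE_short _ (by simp; omega)]
      simp

-- A's interleaved loop from index a fills the two accumulators with the pair tokens of the
-- suffixes from a and a+1, routed by the parity of a.
theorem pvAloop (w : List String) (k : Nat) : ∀ (a : Nat) (ev od : List String), w.length ≤ a + k →
    (PySem.List.pyRange (a : Int) (PySem.List.len w - 1) 1).foldl
      (fun (acc : List String × List String) i =>
        let current_word := PySem.List.pyGetD w i ""
        let next_word := PySem.List.pyGetD w (i + 1) ""
        if PySem.Int.mod i 2 = 0 then
          if PySem.Str.strIsdigit next_word then (acc.1 ++ [current_word, next_word], acc.2)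
          else if PySem.Str.strIsdigit current_word then (acc.1 ++ [current_word], acc.2)
          else (acc.1 ++ [current_word ++ next_word], acc.2)
        else
          if PySem.Str.strIsdigit next_word then (acc.1, acc.2 ++ [current_word, next_word])
          else if PySem.Str.strIsdigit current_word then (acc.1, acc.2 ++ [current_word])
          else (acc.1, acc.2 ++ [current_word ++ next_word])) (ev, od)
    = if a % 2 = 0 then (ev ++ pvE (w.drop a), od ++ pvE (w.drop (a + 1)))
      else (ev ++ pvE (w.drop (a + 1)), od ++ pvE (w.drop a)) := by
  induction k with
  | zero =>
    intro a ev od ha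
    rw [PySem.List.pyRange_one_eq_nil (by simp [PySem.List.len_eq]; omega)]
    rw [pvE_short (w.drop a) (by simp; omega), pvE_short (w.drop (a + 1)) (by simp; omega)]
    simp only [List.foldl_nil, List.append_nil]
    split <;> rfl
  | succ k ih =>
    intro a ev od ha
    by_cases hlt : a + 1 < w.length
    · rw [PySem.List.pyRange_one_cons (by simp [PySem.List.len_eq]; omega)]
      simp only [List.foldl_cons]
      have h1 : ((a : Int) + 1) = ((a + 1 : Nat) : Int) := by push_cast; ring
      have hg1 : PySem.List.pyGetD w (a : Int) "" = w[a] := by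
        rw [PySem.List.pyGetD_natCast, List.getD_eq_getElem?_getD,
          List.getElem?_eq_getElem (by omega : a < w.length)]
        rfl
      have hg2 : PySem.List.pyGetD w (((a + 1 : Nat)) : Int) "" = w[a + 1] := by
        rw [PySem.List.pyGetD_natCast, List.getD_eq_getElem?_getD, List.getElem?_eq_getElem hlt]
        rfl
      have hmod : PySem.Int.mod (a : Int) 2 = ((a % 2 : Nat) : Int) := by
        rw [PySem.Int.mod_eq_emod_of_pos (by norm_num : (0:Int) < 2)]
        push_cast
        omega
      have hdrop : w.drop a = w[a] :: w[a + 1] :: w.drop (a + 2) := by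
        rw [List.drop_eq_getElem_cons (by omega), List.drop_eq_getElem_cons (by omega)]
      have hE : pvE (w.drop a) = pvCombine w[a] w[a + 1] ++ pvE (w.drop (a + 2)) := by
        rw [hdrop]; rfl
      rw [h1, ih (a + 1) _ _ (by omega)]
      simp only [show a + 1 + 1 = a + 2 from by omega]
      by_cases hpar : a % 2 = 0
      · have hm0 : PySem.Int.mod ((a : Nat) : Int) 2 = 0 := by rw [hmod, hpar]; rfl
        rw [if_neg (show ¬ (a + 1) % 2 = 0 by omega), if_pos hpar, hE]
        simp only [hm0, hg1, hg2, pvCombine]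
        split_ifs <;> simp
      · have hm1 : PySem.Int.mod ((a : Nat) : Int) 2 = 1 := by
          rw [hmod, show a % 2 = 1 by omega]; rfl
        rw [if_pos (show (a + 1) % 2 = 0 by omega), if_neg hpar, hE]
        simp only [hm1, hg1, hg2, pvCombine]
        split_ifs <;> simp_all
    · rw [PySem.List.pyRange_one_eq_nil (by simp [PySem.List.len_eq]; omega)]
      rw [pvE_short (w.drop a) (by simp; omega), pvE_short (w.drop (a + 1)) (by simp; omega)]
      simp only [List.foldl_nil, List.append_nil]
      split <;> rfl

-- ===== VERDICT (by name: the statement is the Claim_ definition above) =====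
theorem word_combination_formatter_spec : Claim_equal_word_combination_formatter := by
  intro sentence _
  unfold Spec_word_combination_formatter word_combination_formatter word_combination_formatter_alt
  set w := PySem.Str.split₀ sentence with hw
  have hA := pvAloop w (w.length + 1) 0 [] [] (by omega)
  have hB0 := pvBloop w (w.length + 1) 0 [] (by omega)
  have hB1 := pvBloop w (w.length + 1) 1 [] (by omega)
  simp only [Nat.cast_zero, Nat.cast_one] at hA hB0 hB1
  dsimp only at hA hB0 hB1 ⊢
  rw [hA, hB0, hB1]
  simp [List.drop_one]
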